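-- pv_equiv track=rewrite | github.com/Ajay5201/emplay | problem2.py | swapping
-- ===== SOURCE A (Python) =====
-- def swapping(st):
--     lst=[]
--     lst[:0]=st
--
--     for i in range(len(st)):
--
--         j=i
--         while j<len(st)-1:
--             lst[j],lst[j+1]=lst[j+1],lst[j]
--             j+=2
--
--     return ''.join(lst)
-- ===== SOURCE B (Python) =====
-- def swapping(st):
--     odds = []
--     evens = []
--     even = True
--     for c in st:
--         if even:
--             evens.append(c)
--         else:
--             odds.append(c)
--         even = not even
--     return ''.join(odds) + ''.join(reversed(evens))
-- ===== Notes on version B (the rewrite author's own statement) =====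
-- stated objective: faster
-- what changed: Replaced A's n nested pairwise-swap passes over a mutable list by a single pass that splits characters by index parity and returns the odd-indexed characters followed by the reversed even-indexed characters.
import Mathlib
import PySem

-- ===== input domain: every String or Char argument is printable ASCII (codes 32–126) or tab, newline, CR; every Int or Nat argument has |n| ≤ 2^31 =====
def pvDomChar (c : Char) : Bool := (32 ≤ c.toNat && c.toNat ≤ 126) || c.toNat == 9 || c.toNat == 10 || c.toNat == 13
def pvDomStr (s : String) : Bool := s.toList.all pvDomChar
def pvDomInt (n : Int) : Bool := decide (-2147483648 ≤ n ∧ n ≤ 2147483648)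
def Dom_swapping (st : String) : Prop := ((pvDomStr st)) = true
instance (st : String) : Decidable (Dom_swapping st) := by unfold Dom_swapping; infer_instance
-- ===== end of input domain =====

-- B replaces A's O(n^2) nested pairwise-swap passes by one O(n) pass that splits the
-- characters by index parity and returns odd-indexed chars followed by the reversed
-- even-indexed chars (the same permutation A produces).

-- ===== PORT A =====
-- lst[j], lst[j+1] = lst[j+1], lst[j]  (both reads happen before the writes)
def swapStep (l : List Char) (j : Nat) : List Char :=
  (l.set j (l.getD (j + 1) ' ')).set (j + 1) (l.getD j ' ')

-- the inner 'while j < len(st)-1: swap; j += 2' loop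
def innerLoop (l : List Char) (j : Nat) : List Char :=
  if h : j < l.length - 1 then innerLoop (swapStep l j) (j + 2) else l
termination_by l.length - j
decreasing_by simp [swapStep, List.length_set]; omega

def swapping (st : String) : String :=
  let lst := st.toList
  String.ofList ((List.range lst.length).foldl (fun l i => innerLoop l i) lst)

-- ===== PORT B =====
-- the 'for c in st' loop of Source B, carrying (odds, evens, even)
def bLoop : List Char → List Char → List Char → Bool → List Char × List Char
  | [], odds, evens, _ => (odds, evens)
  | c :: t, odds, evens, even =>
    if even then bLoop t odds (evens ++ [c]) false
    else bLoop t (odds ++ [c]) evens true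

-- ''.join(odds) + ''.join(reversed(evens)) ported as one ofList over the appended char lists (exact)
def swapping_alt (st : String) : String :=
  let p := bLoop st.toList [] [] true
  String.ofList (p.1 ++ p.2.reverse)

-- ===== PRECONDITION & SPEC =====
def Spec_swapping (st : String) (out : String) : Prop := out = swapping_alt st
instance (st : String) (out : String) : Decidable (Spec_swapping st out) := by unfold Spec_swapping; infer_instance

-- ===== CLAIM (what is proved, stated in full; the proofs are below) =====
def Claim_equal_swapping : Prop := ∀ (st : String), Dom_swapping st → Spec_swapping st (swapping st)

-- ===== LEMMAS AND PROOFS =====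

-- even-indexed / odd-indexed elements
def evensOf : List Char → List Char
  | [] => []
  | [x] => [x]
  | x :: _ :: t => x :: evensOf t

def oddsOf : List Char → List Char
  | [] => []
  | [_] => []
  | _ :: y :: t => y :: oddsOf t

-- adjacent pairwise swap (the effect of one inner pass on the suffix)
def pw : List Char → List Char
  | [] => []
  | [x] => [x]
  | x :: y :: t => y :: x :: pw t

theorem cons_lemmas (t : List Char) :
    (∀ x, oddsOf (x :: t) = evensOf t) ∧ (∀ x, evensOf (x :: t) = x :: oddsOf t) := by
  induction t using pw.induct with
  | case1 => exact ⟨fun _ => rfl, fun _ => rfl⟩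
  | case2 a => exact ⟨fun _ => rfl, fun _ => rfl⟩
  | case3 a b t ih =>
    refine ⟨fun x => ?_, fun x => ?_⟩
    · show a :: oddsOf (b :: t) = a :: evensOf t
      rw [ih.1 b]
    · show x :: evensOf (b :: t) = x :: b :: oddsOf t
      rw [ih.2 b]

theorem oddsOf_cons (x : Char) (t : List Char) : oddsOf (x :: t) = evensOf t :=
  (cons_lemmas t).1 x

theorem evensOf_cons (x : Char) (t : List Char) : evensOf (x :: t) = x :: oddsOf t :=
  (cons_lemmas t).2 x

theorem pw_length (m : List Char) : (pw m).length = m.length := by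
  induction m using pw.induct <;> simp [pw, *]

theorem swapStep_append (pre : List Char) (x y : Char) (r : List Char) :
    swapStep (pre ++ x :: y :: r) pre.length = pre ++ y :: x :: r := by
  induction pre with
  | nil => simp [swapStep]
  | cons p pre ih =>
    simp only [swapStep] at ih
    simp only [List.cons_append, List.length_cons, swapStep, List.getD_cons_succ,
      List.set_cons_succ]
    rw [ih]

theorem innerLoop_append (m pre : List Char) :
    innerLoop (pre ++ m) pre.length = pre ++ pw m := by
  induction m using pw.induct generalizing pre with
  | case1 =>
    rw [innerLoop]
    simp [pw]
  | case2 x =>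
    rw [innerLoop]
    have h : ¬ pre.length < (pre ++ [x]).length - 1 := by simp
    rw [dif_neg h]
    simp [pw]
  | case3 x y t ih =>
    rw [innerLoop]
    have h : pre.length < (pre ++ x :: y :: t).length - 1 := by simp
    rw [dif_pos h, swapStep_append]
    have h2 : pre.length + 2 = (pre ++ [y, x]).length := by simp
    have h3 : pre ++ y :: x :: t = (pre ++ [y, x]) ++ t := by simp
    rw [h3, h2, ih (pre ++ [y, x])]
    simp [pw]

-- f m = oddsOf m ++ (evensOf m).reverse is invariant in this mixed form under pw
theorem key1 (r : List Char) :
    oddsOf r ++ (evensOf r).reverse = evensOf (pw r) ++ (oddsOf (pw r)).reverse := by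
  induction r using pw.induct with
  | case1 => rfl
  | case2 x => rfl
  | case3 a b t ih =>
    simp only [pw, oddsOf_cons, evensOf_cons, List.reverse_cons, List.cons_append, List.cons.injEq, true_and]
    rw [← List.append_assoc, ← List.append_assoc, ih]

theorem key2 (x y : Char) (r : List Char) :
    oddsOf (x :: y :: r) ++ (evensOf (x :: y :: r)).reverse
      = y :: (oddsOf (x :: pw r) ++ (evensOf (x :: pw r)).reverse) := by
  simp only [oddsOf_cons, evensOf_cons, List.reverse_cons, List.cons_append, List.cons.injEq, true_and]
  rw [← List.append_assoc, ← List.append_assoc, key1 r]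

theorem fold_passes (d k : Nat) (l : List Char) (hk : k ≤ l.length) (hd : l.length - k = d) :
    (List.range' k d).foldl (fun l i => innerLoop l i) l
      = l.take k ++ (oddsOf (l.drop k) ++ (evensOf (l.drop k)).reverse) := by
  induction d generalizing k l with
  | zero =>
    have : k = l.length := by omega
    subst this
    simp [oddsOf, evensOf]
  | succ d ih =>
    have hk' : k < l.length := by omega
    rw [List.range'_succ, List.foldl_cons]
    have hlen : (l.take k).length = k := by simp [hk]
    have hstep : innerLoop l k = l.take k ++ pw (l.drop k) := by
      have h := innerLoop_append (l.drop k) (l.take k)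
      rw [List.take_append_drop, hlen] at h
      exact h
    rw [hstep]
    -- case on the suffix
    rcases hm : l.drop k with _ | ⟨x, m'⟩
    · exfalso; have := congrArg List.length hm; simp at this; omega
    rcases m' with _ | ⟨y, r⟩
    · -- suffix of length 1 : pw is identity, loop range' (k+1) d does nothing more
      have hlen1 : l.length = k + 1 := by
        have := congrArg List.length hm; simp at this; omega
      have ih' : (List.range' (k+1) d).foldl (fun l i => innerLoop l i) (l.take k ++ pw [x])
          = (l.take k ++ pw [x]).take (k+1) ++
            (oddsOf ((l.take k ++ pw [x]).drop (k+1)) ++ (evensOf ((l.take k ++ pw [x]).drop (k+1))).reverse) := by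
        (apply ih <;> simp [pw, hlen]) <;> omega
      rw [ih']
      have htk : (l.take k ++ pw [x]).take (k+1) = l.take k ++ [x] := by
        rw [pw]; rw [show k + 1 = (l.take k).length + 1 by omega, List.take_append]
        simp
      have hdr : (l.take k ++ pw [x]).drop (k+1) = ([] : List Char) := by
        rw [pw]; rw [show k + 1 = (l.take k).length + 1 by omega, List.drop_append]
        simp
      rw [htk, hdr]
      simp [oddsOf, evensOf]
    · -- suffix of length ≥ 2
      have hpw : pw (x :: y :: r) = y :: x :: pw r := rfl
      have hlen2 : l.length = k + 2 + r.length := by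
        have := congrArg List.length hm; simp at this; omega
      have ih' : (List.range' (k+1) d).foldl (fun l i => innerLoop l i) (l.take k ++ pw (x :: y :: r))
          = (l.take k ++ pw (x :: y :: r)).take (k+1) ++
            (oddsOf ((l.take k ++ pw (x :: y :: r)).drop (k+1)) ++ (evensOf ((l.take k ++ pw (x :: y :: r)).drop (k+1))).reverse) := by
        apply ih <;> simp [hpw, pw_length, hlen2] <;> omega
      rw [ih']
      have htk : (l.take k ++ pw (x :: y :: r)).take (k+1) = l.take k ++ [y] := by
        rw [hpw, show k + 1 = (l.take k).length + 1 by omega, List.take_append]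
        simp
      have hdr : (l.take k ++ pw (x :: y :: r)).drop (k+1) = x :: pw r := by
        rw [hpw, show k + 1 = (l.take k).length + 1 by omega, List.drop_append]
        simp
      rw [htk, hdr]
      rw [key2]
      simp

theorem bLoop_spec (l odds evens : List Char) :
    bLoop l odds evens true = (odds ++ oddsOf l, evens ++ evensOf l) ∧
    bLoop l odds evens false = (odds ++ evensOf l, evens ++ oddsOf l) := by
  induction l generalizing odds evens with
  | nil => simp [bLoop, oddsOf, evensOf]
  | cons c t ih =>
    constructor
    · rw [bLoop]
      rw [(ih odds (evens ++ [c])).2]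
      simp [oddsOf_cons, evensOf_cons]
    · rw [bLoop]
      simp only [Bool.false_eq_true, if_false]
      rw [(ih (odds ++ [c]) evens).1]
      simp [oddsOf_cons, evensOf_cons]

-- ===== VERDICT (by name: the statement is the Claim_ definition above) =====
theorem swapping_spec : Claim_equal_swapping := by
  intro st _
  unfold Spec_swapping swapping swapping_alt
  have hb := (bLoop_spec st.toList [] []).1
  rw [hb]
  have := fold_passes st.toList.length 0 st.toList (Nat.zero_le _) (by omega)
  simp only [List.range_eq_range']
  rw [this]
  simp
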